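-- pv_equiv track=rewrite | github.com/udacity/cd14776-ls-workflows-public | lesson-2-Understanding Agentic Workflows/demo/demo.py | _tool_get_protocol
-- ===== SOURCE A (Python) =====
-- from typing import List, Dict, Any, Optional
--
-- PROTOCOLS = {
--     "standard_pcr": "1. Prepare master mix\n2. Add template DNA\n3. Run thermal cycler: 95°C 2min, 35x(95°C 30s, 55°C 30s, 72°C 1min), 72°C 5min",
--     "dna_extraction": "1. Lyse cells\n2. Add binding buffer\n3. Spin through column\n4. Wash 2x\n5. Elute in 50µL TE buffer",
--     "sequencing_prep": "1. Quantify DNA\n2. Normalize to 10ng/µL\n3. Prepare library\n4. Quality check\n5. Load on sequencer",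
-- }
--
-- def _tool_get_protocol(protocol_name: str) -> Dict[str, Any]:
--     """Tool: Retrieve a standard protocol."""
--     protocol_name_lower = protocol_name.lower().replace(" ", "_").replace("-", "_")
--     for key, value in PROTOCOLS.items():
--         if protocol_name_lower in key or key in protocol_name_lower:
--             return {"protocol": key, "steps": value}
--
--     # Check partial matches
--     for key, value in PROTOCOLS.items():
--         if any(word in key for word in protocol_name_lower.split("_") if len(word) > 2):
--             return {"protocol": key, "steps": value}
--
--     return {"error": f"Protocol '{protocol_name}' not found"}
-- ===== SOURCE B (Python) =====
-- PROTOCOLS = {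
--     "standard_pcr": "1. Prepare master mix\n2. Add template DNA\n3. Run thermal cycler: 95°C 2min, 35x(95°C 30s, 55°C 30s, 72°C 1min), 72°C 5min",
--     "dna_extraction": "1. Lyse cells\n2. Add binding buffer\n3. Spin through column\n4. Wash 2x\n5. Elute in 50µL TE buffer",
--     "sequencing_prep": "1. Quantify DNA\n2. Normalize to 10ng/µL\n3. Prepare library\n4. Quality check\n5. Load on sequencer",
-- }
--
-- def _tool_get_protocol(protocol_name: str):
--     """Tool: Retrieve a standard protocol (single pass with a recorded fallback)."""
--     name = protocol_name.lower().replace(" ", "_").replace("-", "_")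
--     words = [w for w in name.split("_") if len(w) > 2]
--     fallback = None
--     for key, value in PROTOCOLS.items():
--         if name in key or key in name:
--             return {"protocol": key, "steps": value}
--         if fallback is None and any(w in key for w in words):
--             fallback = (key, value)
--     if fallback is not None:
--         return {"protocol": fallback[0], "steps": fallback[1]}
--     return {"error": f"Protocol '{protocol_name}' not found"}
-- ===== Notes on version B (the rewrite author's own statement) =====
-- stated objective: alternative
-- what changed: The two sequential scans over PROTOCOLS are merged into one pass that returns immediately on a substring match and records the first word-level match as a fallback; the word list is filtered once up front instead of per key.
import Mathlib
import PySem

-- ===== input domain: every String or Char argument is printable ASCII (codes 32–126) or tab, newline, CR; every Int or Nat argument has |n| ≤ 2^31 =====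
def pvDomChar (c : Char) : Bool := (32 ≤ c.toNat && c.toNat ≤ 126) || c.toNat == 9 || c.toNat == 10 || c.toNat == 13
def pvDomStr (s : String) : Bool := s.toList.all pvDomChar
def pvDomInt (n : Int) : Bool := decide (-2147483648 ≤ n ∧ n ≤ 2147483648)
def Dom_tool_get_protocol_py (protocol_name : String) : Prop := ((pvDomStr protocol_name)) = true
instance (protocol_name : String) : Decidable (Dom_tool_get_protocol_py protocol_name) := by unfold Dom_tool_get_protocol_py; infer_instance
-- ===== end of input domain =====

-- B merges A's two sequential scans over PROTOCOLS into one pass that records the first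
-- word-level match as a fallback (objective: alternative decomposition, same cost).


-- module constant PROTOCOLS (shared by both ports, as in the Python module)
def pvPROTOCOLS : List (String × String) :=
  [("standard_pcr", "1. Prepare master mix\n2. Add template DNA\n3. Run thermal cycler: 95°C 2min, 35x(95°C 30s, 55°C 30s, 72°C 1min), 72°C 5min"),
   ("dna_extraction", "1. Lyse cells\n2. Add binding buffer\n3. Spin through column\n4. Wash 2x\n5. Elute in 50µL TE buffer"),
   ("sequencing_prep", "1. Quantify DNA\n2. Normalize to 10ng/µL\n3. Prepare library\n4. Quality check\n5. Load on sequencer")]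

-- ===== PORT A =====
-- first loop: substring match either way
def pvLoop1A (n : String) : List (String × String) → Option (List (String × String))
  | [] => none
  | (k, v) :: rest =>
    if PySem.Str.isIn n k || PySem.Str.isIn k n then some [("protocol", k), ("steps", v)]
    else pvLoop1A n rest

-- second loop: any word (len > 2) of the normalized name occurs in the key
def pvLoop2A (n : String) : List (String × String) → Option (List (String × String))
  | [] => none
  | (k, v) :: rest =>
    if (((PySem.Str.split? n "_").getD []).filter (fun w => 2 < PySem.Str.len w)).any
         (fun w => PySem.Str.isIn w k) then some [("protocol", k), ("steps", v)]
    else pvLoop2A n rest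

def pvBodyA (protocol_name n : String) : List (String × String) :=
  match pvLoop1A n pvPROTOCOLS with
  | some r => r
  | none =>
    match pvLoop2A n pvPROTOCOLS with
    | some r => r
    | none => [("error", "Protocol '" ++ protocol_name ++ "' not found")]

def tool_get_protocol_py (protocol_name : String) : List (String × String) :=
  let n := PySem.Str.replace (PySem.Str.replace (PySem.Str.lower protocol_name) " " "_") "-" "_"
  pvBodyA protocol_name n

-- ===== PORT B =====
-- single pass: return on substring match, record first word match as fallback
def pvScanB (protocol_name n : String) (words : List String) :
    List (String × String) → Option (String × String) → List (String × String)
  | [], fallback =>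
    match fallback with
    | some (k, v) => [("protocol", k), ("steps", v)]
    | none => [("error", "Protocol '" ++ protocol_name ++ "' not found")]
  | (k, v) :: rest, fallback =>
    if PySem.Str.isIn n k || PySem.Str.isIn k n then [("protocol", k), ("steps", v)]
    else pvScanB protocol_name n words rest
      (if fallback.isNone && words.any (fun w => PySem.Str.isIn w k) then some (k, v) else fallback)

def tool_get_protocol_py_alt (protocol_name : String) : List (String × String) :=
  let n := PySem.Str.replace (PySem.Str.replace (PySem.Str.lower protocol_name) " " "_") "-" "_"
  let words := ((PySem.Str.split? n "_").getD []).filter (fun w => 2 < PySem.Str.len w)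
  pvScanB protocol_name n words pvPROTOCOLS none

-- ===== PRECONDITION & SPEC =====
def Spec_tool_get_protocol_py (protocol_name : String) (out : List (String × String)) : Prop := out = tool_get_protocol_py_alt protocol_name
instance (protocol_name : String) (out : List (String × String)) : Decidable (Spec_tool_get_protocol_py protocol_name out) := by unfold Spec_tool_get_protocol_py; infer_instance

-- ===== CLAIM (what is proved, stated in full; the proofs are below) =====
def Claim_equal_tool_get_protocol_py : Prop := ∀ (protocol_name : String), Dom_tool_get_protocol_py protocol_name → Spec_tool_get_protocol_py protocol_name (tool_get_protocol_py protocol_name)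

-- ===== LEMMAS AND PROOFS =====
-- A's second loop with the word list abstracted out
def pvLoop2W (words : List String) : List (String × String) → Option (List (String × String))
  | [] => none
  | (k, v) :: rest =>
    if words.any (fun w => PySem.Str.isIn w k) then some [("protocol", k), ("steps", v)]
    else pvLoop2W words rest

theorem pvLoop2A_eq_W (n : String) (l : List (String × String)) :
    pvLoop2A n l = pvLoop2W (((PySem.Str.split? n "_").getD []).filter (fun w => 2 < PySem.Str.len w)) l := by
  induction l with
  | nil => rfl
  | cons p rest ih => cases p; simp [pvLoop2A, pvLoop2W, ih]

-- the single-pass scan equals: first loop, else fallback, else second loop, else error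
theorem pvScanB_eq (pn n : String) (words : List String) (l : List (String × String))
    (fb : Option (String × String)) :
    pvScanB pn n words l fb =
      match pvLoop1A n l with
      | some r => r
      | none =>
        match fb with
        | some (k, v) => [("protocol", k), ("steps", v)]
        | none =>
          match pvLoop2W words l with
          | some r => r
          | none => [("error", "Protocol '" ++ pn ++ "' not found")] := by
  induction l generalizing fb with
  | nil => cases fb with
    | none => rfl
    | some p => cases p; rfl
  | cons p rest ih =>
    obtain ⟨k, v⟩ := p
    simp only [pvScanB, pvLoop1A, pvLoop2W]
    by_cases hc : (PySem.Str.isIn n k || PySem.Str.isIn k n) = true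
    · rw [if_pos hc, if_pos hc]
    · rw [if_neg hc, if_neg hc, ih]
      cases fb with
      | some q =>
        obtain ⟨a, b⟩ := q
        simp [Option.isNone]
      | none =>
        by_cases hw : (words.any fun w => PySem.Str.isIn w k) = true
        · simp only [Option.isNone_none, Bool.true_and]
          rw [if_pos hw, if_pos hw]
        · simp only [Option.isNone_none, Bool.true_and]
          rw [if_neg hw, if_neg hw]

theorem pvMain (pn n : String) :
    pvBodyA pn n =
    pvScanB pn n (((PySem.Str.split? n "_").getD []).filter (fun w => 2 < PySem.Str.len w))
      pvPROTOCOLS none := by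
  unfold pvBodyA
  rw [pvScanB_eq, pvLoop2A_eq_W]

-- ===== VERDICT (by name: the statement is the Claim_ definition above) =====
theorem tool_get_protocol_py_spec : Claim_equal_tool_get_protocol_py := by
  intro pn _
  unfold Spec_tool_get_protocol_py tool_get_protocol_py tool_get_protocol_py_alt
  exact pvMain pn (PySem.Str.replace (PySem.Str.replace (PySem.Str.lower pn) " " "_") "-" "_")
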